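-- pv_equiv track=rewrite | github.com/nurlanyagublu/Modelling-Seminar | firewall_replacement/G72RIJ.py | calculate_connected_nodes_and_links
-- ===== SOURCE A (Python) =====
-- def calculate_connected_nodes_and_links(graph, numNodes):
--     num_nodes_connected = {}
--     num_links_connected = {}
--
--     for node in range(numNodes):
--         neighbors = graph[node]
--         num_nodes_connected[node] = len(neighbors)
--         num_links_connected[node] = sum(len(graph[neighbor]) for neighbor in neighbors)
--
--     return num_nodes_connected, num_links_connected
-- ===== SOURCE B (Python) =====
-- def calculate_connected_nodes_and_links(graph, numNodes):
--     # Different algorithm: a one-pass degree table over graph's keys, then the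
--     # graph flattened into an explicit edge list, then a scatter-accumulate
--     # pass over the edges into zero-initialized dicts: the per-node degree is
--     # COUNTED +1 per edge and neighbor degrees are ADDED edge by edge, instead
--     # of inserting len(neighbors) and an inner sum per node.
--     degree = {u: len(graph[u]) for u in graph}
--     edges = [(u, v) for u in range(numNodes) for v in graph[u]]
--     num_nodes_connected = dict.fromkeys(range(numNodes), 0)
--     num_links_connected = dict.fromkeys(range(numNodes), 0)
--     for u, v in edges:
--         num_nodes_connected[u] += 1
--         num_links_connected[u] += degree[v]
--     return num_nodes_connected, num_links_connected
-- ===== Notes on version B (the rewrite author's own statement) =====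
-- stated objective: alternative
-- what changed: B builds a degree table from graph.items(), flattens the graph into an explicit edge list, and fills zero-initialized result dicts by a scatter-accumulate pass over the edges (counting +1 per edge for degrees, adding the table degree of the edge's endpoint for links), instead of A's per-node loop that inserts len(neighbors) and an inner sum of len(graph[neighbor]).
import Mathlib
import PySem

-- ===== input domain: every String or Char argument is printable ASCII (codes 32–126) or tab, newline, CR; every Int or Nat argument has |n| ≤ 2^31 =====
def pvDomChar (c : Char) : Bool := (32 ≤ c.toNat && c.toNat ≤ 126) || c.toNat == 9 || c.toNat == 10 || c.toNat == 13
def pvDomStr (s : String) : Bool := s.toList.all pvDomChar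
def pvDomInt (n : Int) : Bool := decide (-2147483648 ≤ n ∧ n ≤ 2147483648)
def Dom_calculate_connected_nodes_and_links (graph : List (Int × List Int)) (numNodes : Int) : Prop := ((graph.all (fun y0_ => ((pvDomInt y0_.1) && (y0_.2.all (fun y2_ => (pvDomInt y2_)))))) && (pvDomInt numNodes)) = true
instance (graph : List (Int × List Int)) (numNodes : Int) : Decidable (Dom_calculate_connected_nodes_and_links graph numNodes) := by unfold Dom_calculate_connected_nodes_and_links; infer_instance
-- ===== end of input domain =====

-- One honest line: B flattens the graph into an explicit edge list and fills
-- zero-initialized dicts by scatter-accumulation over the edges, reading a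
-- precomputed degree table (alternative algorithm, same asymptotic cost).

-- ===== PORT A =====
def calculate_connected_nodes_and_links (graph : List (Int × List Int)) (numNodes : Int) : (List (Int × Int)) × (List (Int × Int)) :=
  let g := PySem.Dict.mk graph
  let res := (PySem.List.pyRange 0 numNodes 1).foldl
    (fun (st : PySem.Dict Int Int × PySem.Dict Int Int) node =>
      let neighbors := (g.get? node).getD []          -- graph[node]; Pre_ rules out the KeyError case
      (st.1.insert node (neighbors.length : Int),
       st.2.insert node (neighbors.foldl (fun s nb => s + (((g.get? nb).getD []).length : Int)) 0)))
    (PySem.Dict.empty, PySem.Dict.empty)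
  (res.1.items, res.2.items)

-- ===== PORT B =====
def calculate_connected_nodes_and_links_alt (graph : List (Int × List Int)) (numNodes : Int) : (List (Int × Int)) × (List (Int × Int)) :=
  let g := PySem.Dict.mk graph
  let degree := g.keys.foldl
    (fun (d : PySem.Dict Int Int) u => d.insert u (((g.get? u).getD []).length : Int)) PySem.Dict.empty
  let edges := (PySem.List.pyRange 0 numNodes 1).foldl
    (fun (acc : List (Int × Int)) u => acc ++ ((g.get? u).getD []).map (fun v => (u, v))) []
  let nn0 := (PySem.List.pyRange 0 numNodes 1).foldl
    (fun (d : PySem.Dict Int Int) u => d.insert u 0) PySem.Dict.empty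
  let nl0 := (PySem.List.pyRange 0 numNodes 1).foldl
    (fun (d : PySem.Dict Int Int) u => d.insert u 0) PySem.Dict.empty
  let res := edges.foldl
    (fun (st : PySem.Dict Int Int × PySem.Dict Int Int) uv =>
      (st.1.insert uv.1 (st.1.getD uv.1 0 + 1),                       -- nodes[u] += 1 (u present under Pre_)
       st.2.insert uv.1 (st.2.getD uv.1 0 + degree.getD uv.2 0)))     -- links[u] += degree[v] (present under Pre_)
    (nn0, nl0)
  (res.1.items, res.2.items)

-- ===== PRECONDITION & SPEC =====
-- Pre_ excludes exactly the inputs where Python A raises a KeyError: some node in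
-- range(numNodes), or some neighbor of such a node, is not a key of graph.
def Pre_calculate_connected_nodes_and_links (graph : List (Int × List Int)) (numNodes : Int) : Prop :=
  (∀ p ∈ (PySem.Dict.mk graph).keys, 0 ≤ p → p < numNodes →
     ∀ m ∈ ((PySem.Dict.mk graph).get? p).getD [], ((PySem.Dict.mk graph).get? m).isSome = true) ∧
  numNodes ≤ ((((PySem.Dict.mk graph).keys.filter
      (fun k => decide (0 ≤ k) && decide (k < numNodes))).dedup.length : Int))
instance (graph : List (Int × List Int)) (numNodes : Int) : Decidable (Pre_calculate_connected_nodes_and_links graph numNodes) := by unfold Pre_calculate_connected_nodes_and_links; infer_instance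

def pvWitness_calculate_connected_nodes_and_links : (List (Int × List Int)) × Int :=
  ([(0, [1, 1]), (1, [0]), (2, [5])], 2)

def Spec_calculate_connected_nodes_and_links (graph : List (Int × List Int)) (numNodes : Int) (out : (List (Int × Int)) × (List (Int × Int))) : Prop := out = calculate_connected_nodes_and_links_alt graph numNodes
instance (graph : List (Int × List Int)) (numNodes : Int) (out : (List (Int × Int)) × (List (Int × Int))) : Decidable (Spec_calculate_connected_nodes_and_links graph numNodes out) := by unfold Spec_calculate_connected_nodes_and_links; infer_instance

-- ===== CLAIM (what is proved, stated in full; the proofs are below) =====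
def Claim_equal_calculate_connected_nodes_and_links : Prop := ∀ (graph : List (Int × List Int)) (numNodes : Int), Dom_calculate_connected_nodes_and_links graph numNodes → Pre_calculate_connected_nodes_and_links graph numNodes → Spec_calculate_connected_nodes_and_links graph numNodes (calculate_connected_nodes_and_links graph numNodes)

-- ===== LEMMAS AND PROOFS =====

-- An insert-loop whose values depend only on the key: at a key it never touches it preserves the value.
theorem getD_insert_loop_not_mem (P : List Int) (f : Int → Int) (d : PySem.Dict Int Int) (k : Int)
    (h : k ∉ P) :
    (P.foldl (fun (d : PySem.Dict Int Int) u => d.insert u (f u)) d).getD k 0 = d.getD k 0 := by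
  induction P generalizing d with
  | nil => rfl
  | cons a P ih =>
    rw [List.foldl_cons, ih _ (fun hk => h (List.mem_cons_of_mem a hk)), PySem.Dict.getD_insert,
      if_neg (by rintro rfl; exact h List.mem_cons_self)]

-- … and at a key it does touch it stores the key-determined value (no Nodup needed).
theorem getD_insert_loop_mem (P : List Int) (f : Int → Int) (d : PySem.Dict Int Int) (k : Int)
    (hk : k ∈ P) :
    (P.foldl (fun (d : PySem.Dict Int Int) u => d.insert u (f u)) d).getD k 0 = f k := by
  induction P generalizing d with
  | nil => cases hk
  | cons a P ih =>
    by_cases hP : k ∈ P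
    · rw [List.foldl_cons]
      exact ih _ hP
    · have ha : k = a := by
        rcases List.mem_cons.mp hk with h | h
        · exact h
        · exact absurd h hP
      subst ha
      rw [List.foldl_cons, getD_insert_loop_not_mem P f _ k hP, PySem.Dict.getD_insert, if_pos rfl]

-- The scatter-accumulate loop: the final value at k is the initial one plus the
-- contributions of exactly the edges whose first component is k.
theorem getD_scatter (E : List (Int × Int)) (w : Int × Int → Int) (d : PySem.Dict Int Int) (k : Int) :
    (E.foldl (fun (d : PySem.Dict Int Int) uv => d.insert uv.1 (d.getD uv.1 0 + w uv)) d).getD k 0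
      = d.getD k 0 + ((E.filter (fun uv => uv.1 == k)).map w).sum := by
  induction E generalizing d with
  | nil => simp
  | cons e E ih =>
    rw [List.foldl_cons, List.filter_cons]
    by_cases h : e.1 = k
    · subst h
      simp only [beq_self_eq_true, if_pos, List.map_cons, List.sum_cons]
      rw [ih, PySem.Dict.getD_insert, if_pos rfl]
      ring
    · have hb : (e.1 == k) = false := by simp [h]
      rw [hb]
      simp only [Bool.false_eq_true, if_false]
      rw [ih, PySem.Dict.getD_insert, if_neg (fun he => h he.symm)]

-- Filtering the flattened edge list down to first component k gives exactly k's block.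
theorem filter_flatMap_edges (g : PySem.Dict Int (List Int)) (L : List Int) (k : Int)
    (hk : k ∈ L) (hnd : L.Nodup) :
    ((L.flatMap (fun u => ((g.get? u).getD []).map (fun v => (u, v)))).filter
        (fun uv => uv.1 == k))
      = ((g.get? k).getD []).map (fun v => (k, v)) := by
  induction L with
  | nil => cases hk
  | cons a L ih =>
    rw [List.nodup_cons] at hnd
    rw [List.flatMap_cons, List.filter_append]
    rcases List.mem_cons.mp hk with h | h
    · subst h
      have h1 : ((((g.get? k).getD []).map (fun v => (k, v))).filter (fun uv => uv.1 == k))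
          = ((g.get? k).getD []).map (fun v => (k, v)) := by
        rw [List.filter_eq_self]; intro x hx
        obtain ⟨v, -, rfl⟩ := List.mem_map.mp hx; simp
      have h2 : ((L.flatMap (fun u => ((g.get? u).getD []).map (fun v => (u, v)))).filter
          (fun uv => uv.1 == k)) = [] := by
        rw [List.filter_eq_nil_iff]; intro x hx
        obtain ⟨u, hu, hxu⟩ := List.mem_flatMap.mp hx
        obtain ⟨v, -, rfl⟩ := List.mem_map.mp hxu
        simp only [beq_iff_eq]; exact fun he => hnd.1 (he ▸ hu)
      rw [h1, h2, List.append_nil]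
    · have h1 : ((((g.get? a).getD []).map (fun v => (a, v))).filter (fun uv => uv.1 == k))
          = [] := by
        rw [List.filter_eq_nil_iff]; intro x hx
        obtain ⟨v, -, rfl⟩ := List.mem_map.mp hx
        simp only [beq_iff_eq]; exact fun he => hnd.1 (he ▸ h)
      rw [h1, List.nil_append, ih h hnd.2]

-- The degree table answers len(graph[v]) for every v (0 = len [] when v is no key).
theorem degree_getD (g : PySem.Dict Int (List Int)) (v : Int) :
    (g.keys.foldl (fun (d : PySem.Dict Int Int) u => d.insert u (((g.get? u).getD []).length : Int))
        PySem.Dict.empty).getD v 0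
      = ((((g.get? v).getD []).length : Int)) := by
  by_cases h : v ∈ g.keys
  · exact getD_insert_loop_mem _ _ _ _ h
  · have h0 : g.get? v = none := (PySem.Dict.get?_eq_none_iff_not_mem_keys g v).mpr h
    rw [getD_insert_loop_not_mem _ _ _ _ h, h0]
    simp

-- An insert-loop over L starting from empty has key list exactly L (L Nodup).
theorem keys_insert_loop (L : List Int) (f : Int → Int) (hLnd : L.Nodup) :
    (L.foldl (fun (d : PySem.Dict Int Int) u => d.insert u (f u)) PySem.Dict.empty).keys = L := by
  have h1 : (L.foldl (fun (d : PySem.Dict Int Int) u => d.insert u (f u)) PySem.Dict.empty).keys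
      = PySem.Set.update PySem.Dict.empty.keys L :=
    PySem.Dict.keys_foldl_insert L (fun _ u => f u) PySem.Dict.empty
  rw [h1, PySem.Dict.keys_empty, PySem.Set.update_nil_left]
  exact PySem.Set.ofList_eq_self_of_nodup L hLnd

-- The core equality, stated over an arbitrary dict g and node list L.
theorem main_eq (g : PySem.Dict Int (List Int)) (L : List Int) (hLnd : L.Nodup) :
    (((L.foldl
        (fun (st : PySem.Dict Int Int × PySem.Dict Int Int) node =>
          (st.1.insert node ((((g.get? node).getD []).length : Int)),
           st.2.insert node (((g.get? node).getD []).foldl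
             (fun s nb => s + (((g.get? nb).getD []).length : Int)) 0)))
        (PySem.Dict.empty, PySem.Dict.empty)).1.items,
      (L.foldl
        (fun (st : PySem.Dict Int Int × PySem.Dict Int Int) node =>
          (st.1.insert node ((((g.get? node).getD []).length : Int)),
           st.2.insert node (((g.get? node).getD []).foldl
             (fun s nb => s + (((g.get? nb).getD []).length : Int)) 0)))
        (PySem.Dict.empty, PySem.Dict.empty)).2.items)
      : (List (Int × Int)) × (List (Int × Int)))
    = (((L.foldl (fun (acc : List (Int × Int)) u => acc ++ ((g.get? u).getD []).map (fun v => (u, v))) []).foldl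
          (fun (st : PySem.Dict Int Int × PySem.Dict Int Int) uv =>
            (st.1.insert uv.1 (st.1.getD uv.1 0 + 1),
             st.2.insert uv.1 (st.2.getD uv.1 0 +
               (g.keys.foldl (fun (d : PySem.Dict Int Int) u =>
                 d.insert u (((g.get? u).getD []).length : Int)) PySem.Dict.empty).getD uv.2 0)))
          (L.foldl (fun (d : PySem.Dict Int Int) u => d.insert u 0) PySem.Dict.empty,
           L.foldl (fun (d : PySem.Dict Int Int) u => d.insert u 0) PySem.Dict.empty)).1.items,
        ((L.foldl (fun (acc : List (Int × Int)) u => acc ++ ((g.get? u).getD []).map (fun v => (u, v))) []).foldl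
          (fun (st : PySem.Dict Int Int × PySem.Dict Int Int) uv =>
            (st.1.insert uv.1 (st.1.getD uv.1 0 + 1),
             st.2.insert uv.1 (st.2.getD uv.1 0 +
               (g.keys.foldl (fun (d : PySem.Dict Int Int) u =>
                 d.insert u (((g.get? u).getD []).length : Int)) PySem.Dict.empty).getD uv.2 0)))
          (L.foldl (fun (d : PySem.Dict Int Int) u => d.insert u 0) PySem.Dict.empty,
           L.foldl (fun (d : PySem.Dict Int Int) u => d.insert u 0) PySem.Dict.empty)).2.items) := by
  rw [PySem.List.foldl_prod_mk
      (f := fun (d : PySem.Dict Int Int) node => d.insert node ((((g.get? node).getD []).length : Int)))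
      (g := fun (d : PySem.Dict Int Int) node => d.insert node (((g.get? node).getD []).foldl
        (fun s nb => s + (((g.get? nb).getD []).length : Int)) 0)),
    PySem.List.foldl_prod_mk
      (f := fun (st : PySem.Dict Int Int) (uv : Int × Int) => st.insert uv.1 (st.getD uv.1 0 + 1))
      (g := fun (st : PySem.Dict Int Int) (uv : Int × Int) => st.insert uv.1 (st.getD uv.1 0 +
        (g.keys.foldl (fun (d : PySem.Dict Int Int) u =>
          d.insert u (((g.get? u).getD []).length : Int)) PySem.Dict.empty).getD uv.2 0)),
    PySem.List.foldl_append_eq_flatMap, List.nil_append]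
  set E := L.flatMap (fun u => ((g.get? u).getD []).map (fun v => (u, v))) with hE
  have hEfst : ∀ uv ∈ E, uv.1 ∈ L := by
    intro uv huv
    obtain ⟨u, hu, hx⟩ := List.mem_flatMap.mp (hE ▸ huv)
    obtain ⟨v, -, rfl⟩ := List.mem_map.mp hx
    exact hu
  have hkeysScatter : ∀ (d0 : PySem.Dict Int Int) (w : PySem.Dict Int Int → Int × Int → Int),
      d0.keys = L →
      (E.foldl (fun (d : PySem.Dict Int Int) uv => d.insert uv.1 (w d uv)) d0).keys = L := by
    intro d0 w hd0
    have h1 : (E.foldl (fun (d : PySem.Dict Int Int) uv => d.insert uv.1 (w d uv)) d0).keys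
        = PySem.Set.update d0.keys (E.map (fun uv => uv.1)) :=
      PySem.Dict.keys_foldl_insert_key E (fun uv => uv.1) w d0
    rw [h1, hd0, PySem.Set.update_eq_append_filter]
    have hnil : (PySem.Set.ofList (E.map (fun uv => uv.1))).filter
        (fun y => !(PySem.Set.contains L y)) = [] := by
      rw [List.filter_eq_nil_iff]
      intro x hx
      have hxm : x ∈ E.map (fun uv => uv.1) := by
        rw [PySem.Set.mem_ofList] at hx; exact hx
      obtain ⟨uv, huv, rfl⟩ := List.mem_map.mp hxm
      simp
      exact hEfst uv huv
    rw [hnil, List.append_nil]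
  have hval1 : ∀ k ∈ L,
      (L.foldl (fun (d : PySem.Dict Int Int) u =>
          d.insert u (((g.get? u).getD []).length : Int)) PySem.Dict.empty).getD k 0
        = (E.foldl (fun (d : PySem.Dict Int Int) uv => d.insert uv.1 (d.getD uv.1 0 + 1))
            (L.foldl (fun (d : PySem.Dict Int Int) u => d.insert u 0) PySem.Dict.empty)).getD k 0 := by
    intro k hk
    rw [getD_insert_loop_mem L _ _ k hk,
      getD_scatter E (fun _ => 1),
      getD_insert_loop_mem L (fun _ => 0) _ k hk,
      hE, filter_flatMap_edges g L k hk hLnd]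
    simp [Function.comp_def, List.map_const', List.sum_replicate, mul_one]
  have hval2 : ∀ k ∈ L,
      (L.foldl (fun (d : PySem.Dict Int Int) u =>
          d.insert u (((g.get? u).getD []).foldl
            (fun s nb => s + (((g.get? nb).getD []).length : Int)) 0)) PySem.Dict.empty).getD k 0
        = (E.foldl (fun (d : PySem.Dict Int Int) uv => d.insert uv.1 (d.getD uv.1 0 +
            (g.keys.foldl (fun (d : PySem.Dict Int Int) u =>
              d.insert u (((g.get? u).getD []).length : Int)) PySem.Dict.empty).getD uv.2 0))
            (L.foldl (fun (d : PySem.Dict Int Int) u => d.insert u 0) PySem.Dict.empty)).getD k 0 := by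
    intro k hk
    rw [getD_insert_loop_mem L _ _ k hk,
      getD_scatter E (fun uv =>
        (g.keys.foldl (fun (d : PySem.Dict Int Int) u =>
          d.insert u (((g.get? u).getD []).length : Int)) PySem.Dict.empty).getD uv.2 0),
      getD_insert_loop_mem L (fun _ => 0) _ k hk,
      hE, filter_flatMap_edges g L k hk hLnd,
      PySem.List.foldl_add, List.map_map]
    simp only [zero_add]
    congr 1
    apply List.map_congr_left
    intro v _
    exact (degree_getD g v).symm
  refine Prod.ext_iff.mpr ⟨?_, ?_⟩
  · simp only []
    rw [PySem.Dict.items_eq_map_keys _ (by rw [keys_insert_loop _ _ hLnd]; exact hLnd) 0,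
        PySem.Dict.items_eq_map_keys _
          (by rw [hkeysScatter _ _ (keys_insert_loop _ (fun _ => 0) hLnd)]; exact hLnd) 0,
        keys_insert_loop _ _ hLnd, hkeysScatter _ _ (keys_insert_loop _ (fun _ => 0) hLnd)]
    apply List.map_congr_left
    intro k hk
    exact Prod.ext rfl (hval1 k hk)
  · simp only []
    rw [PySem.Dict.items_eq_map_keys _ (by rw [keys_insert_loop _ _ hLnd]; exact hLnd) 0,
        PySem.Dict.items_eq_map_keys _
          (by rw [hkeysScatter _ _ (keys_insert_loop _ (fun _ => 0) hLnd)]; exact hLnd) 0,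
        keys_insert_loop _ _ hLnd, hkeysScatter _ _ (keys_insert_loop _ (fun _ => 0) hLnd)]
    apply List.map_congr_left
    intro k hk
    exact Prod.ext rfl (hval2 k hk)

-- ===== VERDICT (by name: the statement is the Claim_ definition above) =====
theorem calculate_connected_nodes_and_links_spec : Claim_equal_calculate_connected_nodes_and_links := by
  intro graph numNodes _ _
  exact main_eq (PySem.Dict.mk graph) (PySem.List.pyRange 0 numNodes 1)
    (PySem.List.nodup_pyRange_one 0 numNodes)
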